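-- pv_equiv track=rewrite | github.com/sawyerfeng/TreeRule | utils.py | construct_descendant
-- ===== SOURCE A (Python) =====
-- def parse_rdf(rdf):
--     """
--     return: head, relation, tail
--     """
--     rdf_tail, rdf_rel, rdf_head= rdf
--     return rdf_head, rdf_rel, rdf_tail
--
-- def construct_descendant(rdf_data):
--     """
--     take entity as h, map it to its r, t
--     input: rdf_data
--     return:entity2desced: {h:[(r,t),...],...}
--     """
--     entity2desced = {}
--     for rdf_ in rdf_data:
--         h_, r_, t_ = parse_rdf(rdf_)
--         if h_ not in entity2desced.keys():
--             entity2desced[h_] = [(r_, t_)]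
--         else:
--             entity2desced[h_].append((r_, t_))
--     sorted_entity2desced = dict(sorted(entity2desced.items(), key=lambda x: len(x[1]), reverse=True))
--     sorted_len = [len(x) for x in sorted_entity2desced.values()]
--     top_n_keys = list(sorted_entity2desced.keys())[:1000]
--     return entity2desced
-- ===== SOURCE B (Python) =====
-- def construct_descendant(rdf_data):
--     """Group triples (t, r, h) by head h: {h: [(r, t), ...]} in first-occurrence order."""
--     heads = list(dict.fromkeys(h for (t, r, h) in rdf_data))
--     return {h: [(r, t) for (t, r, h2) in rdf_data if h2 == h] for h in heads}
-- ===== Notes on version B (the rewrite author's own statement) =====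
-- stated objective: alternative
-- what changed: B drops A's dead sorting/slicing and replaces the single-pass dict accumulation with a two-phase decomposition: an ordered dedup of the heads (dict.fromkeys) followed by a per-head filter comprehension collecting each head's (r,t) pairs.
import Mathlib
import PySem

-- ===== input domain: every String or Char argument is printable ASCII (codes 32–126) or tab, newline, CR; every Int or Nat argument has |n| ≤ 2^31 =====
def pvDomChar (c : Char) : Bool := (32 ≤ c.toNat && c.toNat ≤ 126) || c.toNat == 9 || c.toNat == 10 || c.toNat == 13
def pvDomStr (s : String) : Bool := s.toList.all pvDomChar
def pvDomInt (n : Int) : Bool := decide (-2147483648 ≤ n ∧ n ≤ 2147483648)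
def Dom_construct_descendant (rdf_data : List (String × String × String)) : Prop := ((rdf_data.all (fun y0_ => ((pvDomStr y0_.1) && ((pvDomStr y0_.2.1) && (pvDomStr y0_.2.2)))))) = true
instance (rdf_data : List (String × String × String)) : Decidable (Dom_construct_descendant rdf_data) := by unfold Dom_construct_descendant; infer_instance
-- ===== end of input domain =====

-- One honest line: B groups by first-occurrence head via dedup + per-head filter (alternative decomposition); A's
-- unused sorting/slicing lines are ported too but do not affect the return value.
-- ===== PORT A =====
def parse_rdf (rdf : String × String × String) : String × String × String :=
  let rdf_tail := rdf.1; let rdf_rel := rdf.2.1; let rdf_head := rdf.2.2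
  (rdf_head, rdf_rel, rdf_tail)

def construct_descendant (rdf_data : List (String × String × String)) : List (String × List (String × String)) :=
  let entity2desced : PySem.Dict String (List (String × String)) :=
    rdf_data.foldl (fun entity2desced rdf_ =>
      let p := parse_rdf rdf_
      let h_ := p.1; let r_ := p.2.1; let t_ := p.2.2
      if (entity2desced.keys.contains h_) = false then
        entity2desced.insert h_ [(r_, t_)]
      else
        entity2desced.modify h_ [] (fun l => l ++ [(r_, t_)])) PySem.Dict.empty
  -- dead code in A (computed, unused): sorted_entity2desced / sorted_len / top_n_keys
  let sorted_entity2desced : PySem.Dict String (List (String × String)) :=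
    PySem.Dict.ofList (PySem.List.sorted entity2desced.items (fun x => -(PySem.List.len x.2)) false)
  let _sorted_len := sorted_entity2desced.values.map (fun x => PySem.List.len x)
  let _top_n_keys := PySem.List.slice sorted_entity2desced.keys none (some 1000)
  entity2desced.items


-- ===== PORT B =====
def construct_descendant_alt (rdf_data : List (String × String × String)) : List (String × List (String × String)) :=
  let heads := PySem.List.dedup (rdf_data.map (fun x => x.2.2))
  heads.map (fun h =>
    (h, (rdf_data.filter (fun x => x.2.2 == h)).map (fun x => (x.2.1, x.1))))


-- ===== PRECONDITION & SPEC =====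
def Spec_construct_descendant (rdf_data : List (String × String × String)) (out : List (String × List (String × String))) : Prop := out = construct_descendant_alt rdf_data
instance (rdf_data : List (String × String × String)) (out : List (String × List (String × String))) : Decidable (Spec_construct_descendant rdf_data out) := by unfold Spec_construct_descendant; infer_instance

-- ===== CLAIM (what is proved, stated in full; the proofs are below) =====
def Claim_equal_construct_descendant : Prop := ∀ (rdf_data : List (String × String × String)), Dom_construct_descendant rdf_data → Spec_construct_descendant rdf_data (construct_descendant rdf_data)

-- ===== LEMMAS AND PROOFS =====

-- A's loop step equals a plain grouping `modify` step (the branch test only decides insert-vs-append,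
-- and `modify` on a fresh key is exactly that insert).
lemma pv_step_eq (d : PySem.Dict String (List (String × String))) (x : String × String × String) :
    (let p := parse_rdf x
     let h_ := p.1; let r_ := p.2.1; let t_ := p.2.2
     if (d.keys.contains h_) = false then d.insert h_ [(r_, t_)]
     else d.modify h_ [] (fun l => l ++ [(r_, t_)])) =
    d.modify x.2.2 [] (fun l => l ++ [(x.2.1, x.1)]) := by
  by_cases hc : d.contains x.2.2 = true
  · simp [parse_rdf, PySem.Dict.contains, PySem.Dict.keys] at hc ⊢
    simp [hc]
  · have hgd := PySem.Dict.getD_of_not_contains d ([] : List (String × String)) (k := x.2.2) (by simpa using hc)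
    simp [PySem.Dict.contains] at hc
    simp [parse_rdf, PySem.Dict.modify, hgd]

lemma pv_main (rdf_data : List (String × String × String)) :
    construct_descendant rdf_data = construct_descendant_alt rdf_data := by
  unfold construct_descendant construct_descendant_alt
  have hfold :
      rdf_data.foldl (fun entity2desced rdf_ =>
        let p := parse_rdf rdf_
        let h_ := p.1; let r_ := p.2.1; let t_ := p.2.2
        if (entity2desced.keys.contains h_) = false then
          entity2desced.insert h_ [(r_, t_)]
        else
          entity2desced.modify h_ [] (fun l => l ++ [(r_, t_)])) PySem.Dict.empty
      = rdf_data.foldl (fun d x => d.modify x.2.2 [] (fun l => l ++ [(x.2.1, x.1)]))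
          PySem.Dict.empty := by
    congr 1
    funext d x
    exact pv_step_eq d x
  rw [hfold]
  set D := rdf_data.foldl (fun d x => d.modify x.2.2 [] (fun l => l ++ [(x.2.1, x.1)]))
      PySem.Dict.empty with hD
  have hnd : D.keys.Nodup := by
    rw [hD]
    exact PySem.Dict.nodup_keys_foldl_modify_key rdf_data (fun x => x.2.2) []
      (fun _ x l => l ++ [(x.2.1, x.1)]) PySem.Dict.empty (by simp)
  have hkeys : D.keys = PySem.List.dedup (rdf_data.map (fun x => x.2.2)) := by
    rw [hD]
    rw [PySem.Dict.keys_foldl_modify_key rdf_data (fun x => x.2.2) []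
      (fun _ x l => l ++ [(x.2.1, x.1)]) PySem.Dict.empty]
    simp [PySem.Set.update, PySem.Set.ofList, PySem.List.dedup_eq_ofList, PySem.Dict.keys,
      PySem.Dict.empty]
  have hget : ∀ h : String, D.getD h [] =
      (rdf_data.filter (fun x => x.2.2 == h)).map (fun x => (x.2.1, x.1)) := by
    intro h
    have key := PySem.Dict.getD_foldl_modify_append
      (rdf_data.map (fun x : String × String × String => (x.2.2, (x.2.1, x.1))))
      (PySem.Dict.empty : PySem.Dict String (List (String × String))) h
    rw [List.foldl_map] at key
    rw [hD]
    simpa [List.filter_map, Function.comp_def] using key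
  rw [PySem.Dict.items_eq_map_keys D hnd [], hkeys]
  exact List.map_congr_left (fun h _ => by rw [hget h])

-- ===== VERDICT (by name: the statement is the Claim_ definition above) =====
theorem construct_descendant_spec : Claim_equal_construct_descendant := by
  intro rdf_data _
  unfold Spec_construct_descendant
  exact pv_main rdf_data
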